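-- pv_equiv track=rewrite | github.com/adover06/aggie-appetite | backend/app/main.py | _suggest_filters
-- ===== SOURCE A (Python) =====
-- SUGGESTED_FILTERS_MAP = {
--     "protein": ["High Protein"],
--     "peanut butter": ["High Protein", "Vegetarian"],
--     "tofu": ["Vegetarian", "High Protein"],
--     "beans": ["Vegetarian", "High Protein"],
--     "lentils": ["Vegetarian", "High Protein"],
--     "rice": ["Quick (<15 min)"],
--     "noodles": ["Quick (<15 min)"],
--     "pasta": ["Quick (<15 min)"],
--     "oats": ["No-Cook", "Quick (<15 min)"],
--     "bread": ["No-Cook"],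
-- }
--
-- def _suggest_filters(item_names: list[str]) -> list[str]:
--     """Rule-based filter suggestions from identified items."""
--     filters = set()
--     for name in item_names:
--         key = name.strip().lower()
--         if key in SUGGESTED_FILTERS_MAP:
--             filters.update(SUGGESTED_FILTERS_MAP[key])
--     if not filters:
--         filters.add("Quick (<15 min)")
--     return sorted(filters)
-- ===== SOURCE B (Python) =====
-- # B: loop over an inverted (filter -> keywords) table instead of over the item names;
-- # the result list is emitted already in sorted order, so no set accumulation or sort is needed.
-- _INVERTED = [
--     ("High Protein", ("protein", "peanut butter", "tofu", "beans", "lentils")),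
--     ("No-Cook", ("oats", "bread")),
--     ("Quick (<15 min)", ("rice", "noodles", "pasta", "oats")),
--     ("Vegetarian", ("peanut butter", "tofu", "beans", "lentils")),
-- ]
--
-- def _suggest_filters(item_names):
--     items = {n.strip().lower() for n in item_names}
--     result = [f for f, kws in _INVERTED if any(k in items for k in kws)]
--     return result if result else ["Quick (<15 min)"]
-- ===== Notes on version B (the rewrite author's own statement) =====
-- stated objective: alternative
-- what changed: B loops over an inverted filter->keywords table (4 fixed rows, already in sorted order) testing each row against the set of normalized item names, instead of accumulating a set of filters per item and sorting it at the end.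
import Mathlib
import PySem

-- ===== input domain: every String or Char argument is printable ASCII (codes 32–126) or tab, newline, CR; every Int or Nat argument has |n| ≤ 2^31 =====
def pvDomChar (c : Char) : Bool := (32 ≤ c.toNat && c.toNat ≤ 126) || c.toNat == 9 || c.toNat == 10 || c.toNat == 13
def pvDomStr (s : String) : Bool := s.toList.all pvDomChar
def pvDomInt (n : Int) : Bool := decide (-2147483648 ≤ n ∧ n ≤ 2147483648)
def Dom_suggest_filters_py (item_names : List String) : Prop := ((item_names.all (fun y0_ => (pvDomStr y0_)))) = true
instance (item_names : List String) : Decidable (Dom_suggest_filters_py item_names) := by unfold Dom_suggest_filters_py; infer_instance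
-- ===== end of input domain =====

-- B differs from A by iterating over an inverted filter->keywords table (emitted in sorted
-- order) instead of accumulating a set of filters per item and sorting it; same return value.

-- ===== PORT A =====
def SUGGESTED_FILTERS_MAP : PySem.Dict String (List String) :=
  PySem.Dict.ofList
    [("protein", ["High Protein"]),
     ("peanut butter", ["High Protein", "Vegetarian"]),
     ("tofu", ["Vegetarian", "High Protein"]),
     ("beans", ["Vegetarian", "High Protein"]),
     ("lentils", ["Vegetarian", "High Protein"]),
     ("rice", ["Quick (<15 min)"]),
     ("noodles", ["Quick (<15 min)"]),
     ("pasta", ["Quick (<15 min)"]),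
     ("oats", ["No-Cook", "Quick (<15 min)"]),
     ("bread", ["No-Cook"])]

-- key = name.strip().lower()
def pvNorm (n : String) : String := PySem.Str.lower (PySem.Str.strip n)

-- body of A's for-loop: if key in MAP: filters.update(MAP[key])
def pvStepA (s : PySem.Set String) (name : String) : PySem.Set String :=
  match SUGGESTED_FILTERS_MAP.get? (pvNorm name) with
  | some fs => PySem.Set.update s fs
  | none => s

def suggest_filters_py (item_names : List String) : List String :=
  let filters : PySem.Set String := item_names.foldl pvStepA PySem.Set.empty
  let filters := if filters = [] then PySem.Set.add filters "Quick (<15 min)" else filters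
  PySem.List.sorted filters (fun x => x) false

-- ===== PORT B =====
def pvInverted : List (String × List String) :=
  [("High Protein", ["protein", "peanut butter", "tofu", "beans", "lentils"]),
   ("No-Cook", ["oats", "bread"]),
   ("Quick (<15 min)", ["rice", "noodles", "pasta", "oats"]),
   ("Vegetarian", ["peanut butter", "tofu", "beans", "lentils"])]

def suggest_filters_py_alt (item_names : List String) : List String :=
  let items : PySem.Set String := PySem.Set.ofList (item_names.map (fun n => pvNorm n))
  let result := (pvInverted.filter (fun p => p.2.any (fun k => PySem.Set.contains items k))).map Prod.fst
  if result = [] then ["Quick (<15 min)"] else result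

-- ===== PRECONDITION & SPEC =====
def Spec_suggest_filters_py (item_names : List String) (out : List String) : Prop := out = suggest_filters_py_alt item_names
instance (item_names : List String) (out : List String) : Decidable (Spec_suggest_filters_py item_names out) := by unfold Spec_suggest_filters_py; infer_instance

-- ===== CLAIM (what is proved, stated in full; the proofs are below) =====
def Claim_equal_suggest_filters_py : Prop := ∀ (item_names : List String), Dom_suggest_filters_py item_names → Spec_suggest_filters_py item_names (suggest_filters_py item_names)

-- ===== LEMMAS AND PROOFS =====

set_option maxHeartbeats 1000000

-- the literal dict, in canonical items form (used to evaluate get?)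
theorem pv_map_mk : SUGGESTED_FILTERS_MAP = PySem.Dict.mk
    [("protein", ["High Protein"]),
     ("peanut butter", ["High Protein", "Vegetarian"]),
     ("tofu", ["Vegetarian", "High Protein"]),
     ("beans", ["Vegetarian", "High Protein"]),
     ("lentils", ["Vegetarian", "High Protein"]),
     ("rice", ["Quick (<15 min)"]),
     ("noodles", ["Quick (<15 min)"]),
     ("pasta", ["Quick (<15 min)"]),
     ("oats", ["No-Cook", "Quick (<15 min)"]),
     ("bread", ["No-Cook"])] := by decide

-- membership of the fold result
theorem pv_mem_fold (l : List String) (s : PySem.Set String) (x : String) :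
    x ∈ l.foldl pvStepA s ↔
      x ∈ s ∨ ∃ n ∈ l, ∃ fs, SUGGESTED_FILTERS_MAP.get? (pvNorm n) = some fs ∧ x ∈ fs := by
  induction l generalizing s with
  | nil => simp
  | cons a t ih =>
    simp only [List.foldl_cons, ih, List.mem_cons]
    unfold pvStepA
    cases h : SUGGESTED_FILTERS_MAP.get? (pvNorm a) with
    | none =>
      constructor
      · rintro (hx | ⟨n, hn, fs, hfs, hxfs⟩)
        · exact Or.inl hx
        · exact Or.inr ⟨n, Or.inr hn, fs, hfs, hxfs⟩
      · rintro (hx | ⟨n, (rfl | hn), fs, hfs, hxfs⟩)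
        · exact Or.inl hx
        · rw [h] at hfs; cases hfs
        · exact Or.inr ⟨n, hn, fs, hfs, hxfs⟩
    | some fs0 =>
      simp only [PySem.Set.mem_update]
      constructor
      · rintro ((hx | hxf) | ⟨n, hn, fs, hfs, hxfs⟩)
        · exact Or.inl hx
        · exact Or.inr ⟨a, Or.inl rfl, fs0, h, hxf⟩
        · exact Or.inr ⟨n, Or.inr hn, fs, hfs, hxfs⟩
      · rintro (hx | ⟨n, (rfl | hn), fs, hfs, hxfs⟩)
        · exact Or.inl (Or.inl hx)
        · rw [h] at hfs; cases hfs; exact Or.inl (Or.inr hxfs)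
        · exact Or.inr ⟨n, hn, fs, hfs, hxfs⟩

theorem pv_nodup_fold (l : List String) (s : PySem.Set String) (h : s.Nodup) :
    (l.foldl pvStepA s).Nodup := by
  induction l generalizing s with
  | nil => exact h
  | cons a t ih =>
    rw [List.foldl_cons]
    refine ih _ ?_
    unfold pvStepA
    cases SUGGESTED_FILTERS_MAP.get? (pvNorm a) with
    | none => exact h
    | some fs => exact PySem.Set.nodup_update _ _ h

-- what a successful dict lookup can contain
theorem pv_get_char (k x : String) :
    (∃ fs, SUGGESTED_FILTERS_MAP.get? k = some fs ∧ x ∈ fs) ↔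
      (x = "High Protein" ∧ k ∈ ["protein", "peanut butter", "tofu", "beans", "lentils"]) ∨
      (x = "No-Cook" ∧ k ∈ ["oats", "bread"]) ∨
      (x = "Quick (<15 min)" ∧ k ∈ ["rice", "noodles", "pasta", "oats"]) ∨
      (x = "Vegetarian" ∧ k ∈ ["peanut butter", "tofu", "beans", "lentils"]) := by
  by_cases hk : k ∈ ["protein", "peanut butter", "tofu", "beans", "lentils", "rice",
      "noodles", "pasta", "oats", "bread"]
  · simp only [List.mem_cons, List.not_mem_nil, or_false] at hk
    rcases hk with rfl | rfl | rfl | rfl | rfl | rfl | rfl | rfl | rfl | rfl <;>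
      simp [pv_map_mk, PySem.Dict.get?_mk_cons] <;> tauto
  · have hget : SUGGESTED_FILTERS_MAP.get? k = none := by
      simp only [List.mem_cons, List.not_mem_nil, or_false, not_or] at hk
      obtain ⟨h1, h2, h3, h4, h5, h6, h7, h8, h9, h10⟩ := hk
      simp [pv_map_mk, PySem.Dict.get?_mk_cons,
        Ne.symm h1, Ne.symm h2, Ne.symm h3, Ne.symm h4, Ne.symm h5,
        Ne.symm h6, Ne.symm h7, Ne.symm h8, Ne.symm h9, Ne.symm h10]
      try rfl
    simp only [List.mem_cons, List.not_mem_nil, or_false, not_or] at hk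
    simp [hget]
    tauto

-- the characterization of A's accumulated set, in terms of the four flags
theorem pv_mem_char (item_names : List String) (x : String) :
    x ∈ item_names.foldl pvStepA PySem.Set.empty ↔
      (x = "High Protein" ∧ ∃ n ∈ item_names, pvNorm n ∈ ["protein", "peanut butter", "tofu", "beans", "lentils"]) ∨
      (x = "No-Cook" ∧ ∃ n ∈ item_names, pvNorm n ∈ ["oats", "bread"]) ∨
      (x = "Quick (<15 min)" ∧ ∃ n ∈ item_names, pvNorm n ∈ ["rice", "noodles", "pasta", "oats"]) ∨
      (x = "Vegetarian" ∧ ∃ n ∈ item_names, pvNorm n ∈ ["peanut butter", "tofu", "beans", "lentils"]) := by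
  rw [pv_mem_fold]
  have hempty : x ∈ (PySem.Set.empty : PySem.Set String) ↔ False := by
    simp [PySem.Set.empty]
  rw [hempty, false_or]
  constructor
  · rintro ⟨n, hn, hfs⟩
    rcases (pv_get_char (pvNorm n) x).mp hfs with ⟨rfl, h⟩ | ⟨rfl, h⟩ | ⟨rfl, h⟩ | ⟨rfl, h⟩
    · exact Or.inl ⟨rfl, n, hn, h⟩
    · exact Or.inr (Or.inl ⟨rfl, n, hn, h⟩)
    · exact Or.inr (Or.inr (Or.inl ⟨rfl, n, hn, h⟩))
    · exact Or.inr (Or.inr (Or.inr ⟨rfl, n, hn, h⟩))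
  · rintro (⟨rfl, n, hn, h⟩ | ⟨rfl, n, hn, h⟩ | ⟨rfl, n, hn, h⟩ | ⟨rfl, n, hn, h⟩)
    · exact ⟨n, hn, (pv_get_char (pvNorm n) _).mpr (Or.inl ⟨rfl, h⟩)⟩
    · exact ⟨n, hn, (pv_get_char (pvNorm n) _).mpr (Or.inr (Or.inl ⟨rfl, h⟩))⟩
    · exact ⟨n, hn, (pv_get_char (pvNorm n) _).mpr (Or.inr (Or.inr (Or.inl ⟨rfl, h⟩)))⟩
    · exact ⟨n, hn, (pv_get_char (pvNorm n) _).mpr (Or.inr (Or.inr (Or.inr ⟨rfl, h⟩)))⟩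

-- B's row test equals the flag of that row
theorem pv_row (item_names kws : List String) :
    (kws.any (fun k => PySem.Set.contains (PySem.Set.ofList (item_names.map (fun n => pvNorm n))) k)) = true ↔
      ∃ n ∈ item_names, pvNorm n ∈ kws := by
  simp only [List.any_eq_true, PySem.Set.contains_iff, PySem.Set.mem_ofList, List.mem_map]
  constructor
  · rintro ⟨k, hk, n, hn, rfl⟩; exact ⟨n, hn, hk⟩
  · rintro ⟨n, hn, hk⟩; exact ⟨pvNorm n, hk, n, hn, rfl⟩

-- a strictly increasing list with the same members is the sorted result
theorem pv_sorted_eq (F L : List String) (hF : F.Nodup) (hL : L.Nodup)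
    (hp : L.Pairwise (· < ·)) (hm : ∀ x, x ∈ F ↔ x ∈ L) :
    PySem.List.sorted F (fun x => x) false = L := by
  have perm : L.Perm F := (List.perm_ext_iff_of_nodup hL hF).mpr (fun a => (hm a).symm)
  exact PySem.List.sorted_eq_of_perm_of_pairwise_lt _ _ _ perm hp

-- ===== VERDICT (by name: the statement is the Claim_ definition above) =====
theorem suggest_filters_py_spec : Claim_equal_suggest_filters_py := by
  intro item_names _
  unfold Spec_suggest_filters_py
  by_cases E1 : ∃ n ∈ item_names, pvNorm n ∈ ["protein", "peanut butter", "tofu", "beans", "lentils"] <;>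
  by_cases E2 : ∃ n ∈ item_names, pvNorm n ∈ ["oats", "bread"] <;>
  by_cases E3 : ∃ n ∈ item_names, pvNorm n ∈ ["rice", "noodles", "pasta", "oats"] <;>
  by_cases E4 : ∃ n ∈ item_names, pvNorm n ∈ ["peanut butter", "tofu", "beans", "lentils"] <;>
  · simp only [suggest_filters_py, suggest_filters_py_alt, pvInverted,
      List.filter_cons, List.filter_nil, pv_row, E1, E2, E3, E4,
      if_true, if_false, List.map_cons, List.map_nil, reduceCtorEq, List.map]
    first
    | -- at least one flag true: the fold result is nonempty
      (have hne : item_names.foldl pvStepA PySem.Set.empty ≠ [] := by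
        intro h0
        have hm : ∃ y, y ∈ item_names.foldl pvStepA PySem.Set.empty := by
          first
          | exact ⟨_, (pv_mem_char item_names "High Protein").mpr (Or.inl ⟨rfl, E1⟩)⟩
          | exact ⟨_, (pv_mem_char item_names "No-Cook").mpr (Or.inr (Or.inl ⟨rfl, E2⟩))⟩
          | exact ⟨_, (pv_mem_char item_names "Quick (<15 min)").mpr (Or.inr (Or.inr (Or.inl ⟨rfl, E3⟩)))⟩
          | exact ⟨_, (pv_mem_char item_names "Vegetarian").mpr (Or.inr (Or.inr (Or.inr ⟨rfl, E4⟩)))⟩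
        obtain ⟨y, hy⟩ := hm
        rw [h0] at hy
        exact List.not_mem_nil hy
       rw [if_neg hne]
       clear hne
       refine pv_sorted_eq _ _ (pv_nodup_fold _ _ List.nodup_nil) (by decide)
         (by simp only [List.pairwise_cons, List.mem_cons, List.not_mem_nil, forall_eq_or_imp,
               forall_eq, false_implies, and_true, true_and, List.Pairwise.nil]
             and_intros <;> first
               | (intros; trivial)
               | (rw [String.lt_iff_toList_lt]; decide)) ?_
       intro x
       rw [pv_mem_char]
       simp only [E1, E2, E3, E4, and_true, and_false]
       simp only [List.mem_cons, List.not_mem_nil, or_false, false_or])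
    | -- all flags false: the fold result is empty
      (have hnil : item_names.foldl pvStepA PySem.Set.empty = [] := by
        refine List.eq_nil_iff_forall_not_mem.mpr (fun x hx => ?_)
        rcases (pv_mem_char item_names x).mp hx with ⟨_, h⟩ | ⟨_, h⟩ | ⟨_, h⟩ | ⟨_, h⟩
        exacts [E1 h, E2 h, E3 h, E4 h]
       rw [hnil]
       decide)
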